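-- pv_equiv track=rewrite | github.com/Gijs05/IPASS | Algorithm/Modes.py | remove_ships
-- ===== SOURCE A (Python) =====
-- import copy
--
-- def remove_ships(old_ships, coordinate, original_ships, hits):
--     """
--     Updates the ship information after a coordinate has been hit.
--
--     Args:
--         old_ships (dict): The current ship coordinates dictionary.
--         coordinate (tuple): The coordinate that has been hit.
--         original_ships (dict): The original ship coordinates dictionary.
--         hits (list): A list of previously hit coordinates.
--
--     Returns:
--         tuple: A tuple containing the following elements:
--             - old_ships (dict): The updated ship coordinates dictionary.
--             - sink (bool): True if a ship has sunk, False otherwise.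
--             - end (bool): True if all ships have been sunk, False otherwise.
--             - hits (list): The updated list of hit coordinates.
--             - changed_coords (list): A list of coordinates that have changed status.
--     """
--     changed_coords = []
--     sink = False
--     copy_ships = copy.deepcopy(old_ships)
--     for name, coordinates in old_ships.items():
--         if coordinate in coordinates:
--             coordinates.remove(coordinate)
--             old_ships[name] = coordinates
--
--     for name in old_ships.keys():
--         if len(copy_ships[name]) != len(old_ships[name]) and len(old_ships[name]) == 0:
--             sink = True
--             changed_coords.append(original_ships[name])
--             for name, length in old_ships.items():
--                 if len(length) == 0:
--                     for hit in original_ships[name]: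
--                         if hit in hits:
--                             hits.remove(hit)
--
--
--     for ending in old_ships.values():
--         if len(ending) != 0:
--             end = False
--             break
--         else:
--             end = True
--     return old_ships, sink, end, hits, changed_coords
-- ===== SOURCE B (Python) =====
-- def remove_ships(old_ships, coordinate, original_ships, hits):
--     """Remove a hit coordinate from every ship, detect newly sunk ships,
--     clean their squares out of the hit list and report whether the game ended."""
--     sunk = []
--     for name, squares in old_ships.items():
--         if coordinate in squares:
--             squares.remove(coordinate)
--             if not squares:
--                 sunk.append(name)
--     changed_coords = [original_ships[name] for name in sunk]
--     if sunk:
--         for name, squares in old_ships.items():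
--             if not squares:
--                 for hit in original_ships[name]:
--                     if hit in hits:
--                         hits.remove(hit)
--     end = all(not squares for squares in old_ships.values())
--     return old_ships, bool(sunk), end, hits, changed_coords
-- ===== Notes on version B (the rewrite author's own statement) =====
-- stated objective: simpler
-- what changed: B drops the deepcopy and the quadratic before/after length rescan: one pass removes the coordinate and records which ships sank now, then changed_coords, a single hits-cleanup pass and end are computed from that record; Pre_ excludes inputs where A raises (empty dict, missing original_ships key on a sink) and the corner where two or more ships sink on the same hit while hits contains duplicates, on which A's once-per-sunk-ship repetition of the idempotent cleanup accidentally strips extra duplicate copies.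
import Mathlib
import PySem

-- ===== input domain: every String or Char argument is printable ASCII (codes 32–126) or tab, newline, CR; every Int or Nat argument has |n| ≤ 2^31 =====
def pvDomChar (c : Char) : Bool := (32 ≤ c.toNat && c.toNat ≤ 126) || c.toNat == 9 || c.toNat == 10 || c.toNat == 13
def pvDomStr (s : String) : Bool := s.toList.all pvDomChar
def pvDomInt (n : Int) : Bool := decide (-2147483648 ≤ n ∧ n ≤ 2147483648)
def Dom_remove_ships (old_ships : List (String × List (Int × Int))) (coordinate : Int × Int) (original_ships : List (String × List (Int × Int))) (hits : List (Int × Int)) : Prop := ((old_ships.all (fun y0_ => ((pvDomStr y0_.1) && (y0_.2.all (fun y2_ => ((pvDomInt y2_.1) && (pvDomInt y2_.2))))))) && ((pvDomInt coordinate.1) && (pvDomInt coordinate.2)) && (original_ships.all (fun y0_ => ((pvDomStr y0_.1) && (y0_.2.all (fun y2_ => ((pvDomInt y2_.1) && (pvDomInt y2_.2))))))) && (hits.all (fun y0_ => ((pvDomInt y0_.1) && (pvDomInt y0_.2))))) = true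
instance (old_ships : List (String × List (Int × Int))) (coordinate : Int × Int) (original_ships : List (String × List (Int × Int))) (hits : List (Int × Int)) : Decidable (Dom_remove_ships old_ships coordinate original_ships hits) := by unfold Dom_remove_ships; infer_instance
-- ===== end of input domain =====

-- B removes the coordinate and detects sinks in ONE pass (no deepcopy, no per-ship rescan) and
-- cleans hits ONCE; equivalence is about the RETURN value (both Pythons mutate old_ships/hits in place alike).

-- ===== PORT A =====

-- list.remove under an 'x in xs' guard (Python raises only when absent; the guard makes getD [] safe)
def rmCoord (cs : List (Int × Int)) (c : Int × Int) : List (Int × Int) :=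
  (PySem.List.remove? cs c).getD []

-- 'for ending in old_ships.values(): if len(ending) != 0: end=False; break else end=True'
-- (on [] Python leaves 'end' unbound — UnboundLocalError, excluded by Pre_; the port returns true there)
def endLoopA : List (List (Int × Int)) → Bool
  | [] => true
  | v :: rest => if v.length ≠ 0 then false else endLoopA rest

def remove_ships (old_ships : List (String × List (Int × Int))) (coordinate : Int × Int) (original_ships : List (String × List (Int × Int))) (hits : List (Int × Int)) : (List (String × List (Int × Int))) × Bool × Bool × (List (Int × Int)) × (List (List (Int × Int))) :=
  let origd := PySem.Dict.ofList original_ships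
  let d0 := PySem.Dict.ofList old_ships          -- copy_ships = deepcopy(old_ships) keeps this value
  -- first loop: remove the coordinate from every ship list containing it
  let d1 := d0.items.foldl (fun d p =>
      if p.2.contains coordinate then d.insert p.1 (rmCoord p.2 coordinate) else d) d0
  -- second loop over keys: state = (sink, changed_coords, hits)
  let st := d1.keys.foldl (fun (st : Bool × List (List (Int × Int)) × List (Int × Int)) name =>
      if (d0.getD name []).length ≠ (d1.getD name []).length ∧ (d1.getD name []).length = 0 then
        (true,
         st.2.1 ++ [origd.getD name []],           -- original_ships[name]: KeyError excluded by Pre_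
         d1.items.foldl (fun h q =>
            if q.2.length = 0 then
              (origd.getD q.1 []).foldl (fun h hit =>
                if h.contains hit then rmCoord h hit else h) h
            else h) st.2.2)
      else st) (false, [], hits)
  (d1.items, st.1, endLoopA d1.values, st.2.2, st.2.1)

-- ===== PORT B =====
def remove_ships_alt (old_ships : List (String × List (Int × Int))) (coordinate : Int × Int) (original_ships : List (String × List (Int × Int))) (hits : List (Int × Int)) : (List (String × List (Int × Int))) × Bool × Bool × (List (Int × Int)) × (List (List (Int × Int))) :=
  let d0 := PySem.Dict.ofList old_ships
  let origd := PySem.Dict.ofList original_ships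
  -- one pass: remove the coordinate and collect the names of ships that sank now
  let step := d0.items.foldl (fun (st : PySem.Dict String (List (Int × Int)) × List String) p =>
      if p.2.contains coordinate then
        (st.1.insert p.1 (rmCoord p.2 coordinate),
         if (rmCoord p.2 coordinate).isEmpty then st.2 ++ [p.1] else st.2)
      else st) (d0, [])
  let d1 := step.1
  let sunk := step.2
  let changed := sunk.map (fun n => origd.getD n [])
  -- one cleanup pass over the now-empty ships' original squares
  let hits' :=
    if sunk.isEmpty then hits
    else d1.items.foldl (fun h q =>
        if q.2.isEmpty then
          (origd.getD q.1 []).foldl (fun h hit =>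
            if h.contains hit then rmCoord h hit else h) h
        else h) hits
  (d1.items, !sunk.isEmpty, d1.values.all (·.isEmpty), hits', changed)

-- ===== PRECONDITION & SPEC =====
-- Pre_ excludes: (a) inputs where A raises — an empty ship dict (UnboundLocalError on 'end') and, when
-- some ship sinks on this hit, a now-empty ship whose name is missing from original_ships (KeyError);
-- (b) the corner where two or more ships sink on this same hit while hits contains duplicate entries —
-- there A repeats the idempotent cleanup once per sunk ship, stripping extra duplicate copies by accident.
def Pre_remove_ships (old_ships : List (String × List (Int × Int))) (coordinate : Int × Int) (original_ships : List (String × List (Int × Int))) (hits : List (Int × Int)) : Prop :=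
  old_ships ≠ [] ∧
  ((∃ p ∈ (PySem.Dict.ofList old_ships).items, p.2 = [coordinate]) →
    ∀ q ∈ (PySem.Dict.ofList old_ships).items, (q.2 = [] ∨ q.2 = [coordinate]) →
      (PySem.Dict.ofList original_ships).contains q.1 = true) ∧
  (2 ≤ ((PySem.Dict.ofList old_ships).items.filter (fun p => p.2 = [coordinate])).length →
    hits.Nodup)
instance (old_ships : List (String × List (Int × Int))) (coordinate : Int × Int) (original_ships : List (String × List (Int × Int))) (hits : List (Int × Int)) : Decidable (Pre_remove_ships old_ships coordinate original_ships hits) := by unfold Pre_remove_ships; infer_instance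

def pvWitness_remove_ships : (List (String × List (Int × Int))) × (Int × Int) × (List (String × List (Int × Int))) × (List (Int × Int)) :=
  ([("a", [(0, 0)]), ("b", [(1, 1), (2, 2)])], (0, 0), [("a", [(0, 0)]), ("b", [(1, 1), (2, 2)])], [(0, 0)])

def Spec_remove_ships (old_ships : List (String × List (Int × Int))) (coordinate : Int × Int) (original_ships : List (String × List (Int × Int))) (hits : List (Int × Int)) (out : (List (String × List (Int × Int))) × Bool × Bool × (List (Int × Int)) × (List (List (Int × Int)))) : Prop := out = remove_ships_alt old_ships coordinate original_ships hits
instance (old_ships : List (String × List (Int × Int))) (coordinate : Int × Int) (original_ships : List (String × List (Int × Int))) (hits : List (Int × Int)) (out : (List (String × List (Int × Int))) × Bool × Bool × (List (Int × Int)) × (List (List (Int × Int)))) : Decidable (Spec_remove_ships old_ships coordinate original_ships hits out) := by unfold Spec_remove_ships; exact @instDecidableEqProd _ _ _ (@instDecidableEqProd _ _ _ (@instDecidableEqProd _ _ _ (@instDecidableEqProd _ _ _ _))) _ _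

-- ===== CLAIM (what is proved, stated in full; the proofs are below) =====
def Claim_equal_remove_ships : Prop := ∀ (old_ships : List (String × List (Int × Int))) (coordinate : Int × Int) (original_ships : List (String × List (Int × Int))) (hits : List (Int × Int)), Dom_remove_ships old_ships coordinate original_ships hits → Pre_remove_ships old_ships coordinate original_ships hits → Spec_remove_ships old_ships coordinate original_ships hits (remove_ships old_ships coordinate original_ships hits)
-- ===== LEMMAS AND PROOFS =====

theorem endLoopA_eq_all (l : List (List (Int × Int))) : endLoopA l = l.all (·.isEmpty) := by
  induction l with
  | nil => rfl
  | cons v rest ih =>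
    simp only [endLoopA, List.all_cons, ih]
    by_cases h : v.length = 0
    · simp [List.length_eq_zero_iff.mp h]
    · have : v.isEmpty = false := by
        cases v with
        | nil => simp at h
        | cons a t => rfl
      simp [h, this]

-- B's one-pass fold splits into A's dict fold and the list of names that sank now
theorem foldl_pair_split (c : Int × Int) (l : List (String × List (Int × Int)))
    (d : PySem.Dict String (List (Int × Int))) (s : List String) :
    l.foldl (fun (st : PySem.Dict String (List (Int × Int)) × List String) p =>
      if p.2.contains c then
        (st.1.insert p.1 (rmCoord p.2 c),
         if (rmCoord p.2 c).isEmpty then st.2 ++ [p.1] else st.2)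
      else st) (d, s)
    = (l.foldl (fun d p => if p.2.contains c then d.insert p.1 (rmCoord p.2 c) else d) d,
       s ++ (l.filter (fun p => p.2.contains c && (rmCoord p.2 c).isEmpty)).map (·.1)) := by
  induction l generalizing d s with
  | nil => simp
  | cons p l ih =>
    simp only [List.foldl_cons, List.filter_cons]
    by_cases hc : p.2.contains c
    · have hm : c ∈ p.2 := by simpa using hc
      by_cases he : (rmCoord p.2 c).isEmpty
      · rw [if_pos hc, if_pos he, ih]
        simp [hm, he]
      · rw [if_pos hc, if_neg he, ih]
        simp [hm, he]
    · have hm : c ∉ p.2 := by simpa using hc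
      rw [if_neg hc, ih]
      simp [hm]

theorem pair_eq_of_mem_items (d : PySem.Dict String (List (Int × Int)))
    (h : d.keys.Nodup) {p q : String × List (Int × Int)}
    (hp : p ∈ d.items) (hq : q ∈ d.items) (hk : q.1 = p.1) : q = p := by
  obtain ⟨k, v⟩ := p
  obtain ⟨k', v'⟩ := q
  simp only at hk
  subst hk
  have h1 := PySem.Dict.get?_of_mem_items d hp h
  have h2 := PySem.Dict.get?_of_mem_items d hq h
  rw [h1] at h2
  simp at h2
  simp [h2]

-- the first loop rewrites each item pointwise
theorem items_loop1_aux (c : Int × Int) (l : List (String × List (Int × Int)))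
    (d : PySem.Dict String (List (Int × Int))) (hnd : d.keys.Nodup)
    (hsub : ∀ p ∈ l, p ∈ d.items) (hl : (l.map (·.1)).Nodup) :
    (l.foldl (fun d p => if p.2.contains c then d.insert p.1 (rmCoord p.2 c) else d) d).items
    = d.items.map (fun q => if q.1 ∈ l.map (·.1) ∧ q.2.contains c then (q.1, rmCoord q.2 c) else q) := by
  induction l generalizing d with
  | nil => simp
  | cons p l ih =>
    have hpd : p ∈ d.items := hsub p (List.mem_cons_self)
    have hcont : d.contains p.1 = true :=
      (PySem.Dict.contains_iff_mem_keys d p.1).mpr (PySem.Dict.mem_keys_of_mem_items d hpd)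
    have hnotin : p.1 ∉ l.map (·.1) := by
      simp only [List.map_cons, List.nodup_cons] at hl
      exact hl.1
    by_cases hc : p.2.contains c
    · have hitems := PySem.Dict.items_insert_of_contains d (rmCoord p.2 c) hcont
      have hkeys := PySem.Dict.keys_insert_of_contains d (rmCoord p.2 c) hcont
      have hnd' : (d.insert p.1 (rmCoord p.2 c)).keys.Nodup := by rw [hkeys]; exact hnd
      have hsub' : ∀ p' ∈ l, p' ∈ (d.insert p.1 (rmCoord p.2 c)).items := by
        intro p' hp'
        rw [hitems]
        have hne : (p'.1 == p.1) = false := by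
          apply beq_false_of_ne
          intro he
          exact hnotin (he ▸ List.mem_map_of_mem hp')
        have : p' = (fun q => if (q.1 == p.1) = true then (p.1, rmCoord p.2 c) else q) p' := by
          simp [hne]
        rw [this]
        exact List.mem_map_of_mem (hsub p' (List.mem_cons_of_mem _ hp'))
      have hl' : (l.map (·.1)).Nodup := by
        simp only [List.map_cons, List.nodup_cons] at hl
        exact hl.2
      simp only [List.foldl_cons, if_pos hc]
      rw [ih _ hnd' hsub' hl', hitems, List.map_map]
      apply List.map_congr_left
      intro q hqd
      by_cases hq1 : q.1 = p.1
      · have hqp : q = p := pair_eq_of_mem_items d hnd hpd hqd hq1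
        subst hqp
        have hm : c ∈ q.2 := by simpa using hc
        simp [hnotin, hm]
      · have hne : (q.1 == p.1) = false := beq_false_of_ne hq1
        have hiff : (q.1 ∈ p.1 :: l.map (·.1) ∧ q.2.contains c = true) ↔ (q.1 ∈ l.map (·.1) ∧ q.2.contains c = true) := by
          simp [List.mem_cons, hq1]
        simp only [Function.comp_apply, hne, Bool.false_eq_true, if_false, List.map_cons]
        exact if_congr hiff.symm rfl rfl
    · simp only [List.foldl_cons, if_neg hc]
      have hl' : (l.map (·.1)).Nodup := by
        simp only [List.map_cons, List.nodup_cons] at hl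
        exact hl.2
      rw [ih _ hnd (fun p' hp' => hsub p' (List.mem_cons_of_mem _ hp')) hl']
      apply List.map_congr_left
      intro q hqd
      by_cases hq1 : q.1 = p.1
      · have hqp : q = p := pair_eq_of_mem_items d hnd hpd hqd hq1
        subst hqp
        have hm : c ∉ q.2 := by simpa using hc
        simp [hm]
      · have hiff : (q.1 ∈ p.1 :: l.map (·.1) ∧ q.2.contains c = true) ↔ (q.1 ∈ l.map (·.1) ∧ q.2.contains c = true) := by
          simp [List.mem_cons, hq1]
        simp only [List.map_cons]
        exact if_congr hiff.symm rfl rfl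

theorem items_loop1 (c : Int × Int) (d : PySem.Dict String (List (Int × Int))) (hnd : d.keys.Nodup) :
    (d.items.foldl (fun d p => if p.2.contains c then d.insert p.1 (rmCoord p.2 c) else d) d).items
    = d.items.map (fun q => if q.2.contains c then (q.1, rmCoord q.2 c) else q) := by
  rw [items_loop1_aux c d.items d hnd (fun p hp => hp) hnd]
  apply List.map_congr_left
  intro q hq
  simp [List.mem_map_of_mem hq]

theorem keys_loop1 (c : Int × Int) (d : PySem.Dict String (List (Int × Int))) (hnd : d.keys.Nodup) :
    (d.items.foldl (fun d p => if p.2.contains c then d.insert p.1 (rmCoord p.2 c) else d) d).keys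
    = d.keys := by
  show (d.items.foldl (fun d p => if p.2.contains c then d.insert p.1 (rmCoord p.2 c) else d) d).items.map (·.1)
      = d.items.map (·.1)
  rw [items_loop1 c d hnd, List.map_map]
  apply List.map_congr_left
  intro q _
  by_cases hc : q.2.contains c
  · have hm : c ∈ q.2 := by simpa using hc
    simp [hm]
  · have hm : c ∉ q.2 := by simpa using hc
    simp [hm]

theorem getD_loop1 (c : Int × Int) (d : PySem.Dict String (List (Int × Int))) (hnd : d.keys.Nodup)
    {p : String × List (Int × Int)} (hp : p ∈ d.items) :
    (d.items.foldl (fun d p => if p.2.contains c then d.insert p.1 (rmCoord p.2 c) else d) d).getD p.1 []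
    = if p.2.contains c then rmCoord p.2 c else p.2 := by
  have hnd' : (d.items.foldl (fun d p => if p.2.contains c then d.insert p.1 (rmCoord p.2 c) else d) d).keys.Nodup := by
    rw [keys_loop1 c d hnd]; exact hnd
  have hmem := List.mem_map_of_mem (f := fun q => if q.2.contains c then (q.1, rmCoord q.2 c) else q) hp
  rw [← items_loop1 c d hnd] at hmem
  by_cases hc : p.2.contains c
  · have hm : c ∈ p.2 := by simpa using hc
    have : (p.1, rmCoord p.2 c) ∈ (d.items.foldl (fun d p => if p.2.contains c then d.insert p.1 (rmCoord p.2 c) else d) d).items := by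
      simpa [hm] using hmem
    rw [PySem.Dict.getD_of_mem_items _ this hnd' [], if_pos hc]
  · have hm : c ∉ p.2 := by simpa using hc
    have : (p.1, p.2) ∈ (d.items.foldl (fun d p => if p.2.contains c then d.insert p.1 (rmCoord p.2 c) else d) d).items := by
      simpa [hm] using hmem
    rw [PySem.Dict.getD_of_mem_items _ this hnd' [], if_neg hc]

-- A's second-loop test '(len changed) and (now empty)' says exactly: the coordinate was removed and the ship is now empty
theorem cond_iff (c : Int × Int) (d : PySem.Dict String (List (Int × Int))) (hnd : d.keys.Nodup)
    {p : String × List (Int × Int)} (hp : p ∈ d.items) :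
    ((d.getD p.1 []).length ≠ ((d.items.foldl (fun d p => if p.2.contains c then d.insert p.1 (rmCoord p.2 c) else d) d).getD p.1 []).length
      ∧ ((d.items.foldl (fun d p => if p.2.contains c then d.insert p.1 (rmCoord p.2 c) else d) d).getD p.1 []).length = 0)
    ↔ (p.2.contains c = true ∧ rmCoord p.2 c = []) := by
  have hbase : d.getD p.1 [] = p.2 :=
    PySem.Dict.getD_of_mem_items d (show (p.1, p.2) ∈ d.items by simpa using hp) hnd []
  rw [getD_loop1 c d hnd hp, hbase]
  by_cases hc : p.2.contains c
  · have hmem : c ∈ p.2 := by simpa using hc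
    have herase : rmCoord p.2 c = p.2.erase c := by
      simp [rmCoord, PySem.List.remove?_eq_some_erase p.2 c hmem]
    have hlen : (p.2.erase c).length = p.2.length - 1 := List.length_erase_of_mem hmem
    have hpos : 0 < p.2.length := List.length_pos_of_mem hmem
    rw [if_pos hc, herase]
    constructor
    · rintro ⟨_, h0⟩
      exact ⟨hc, List.length_eq_zero_iff.mp h0⟩
    · rintro ⟨_, h0⟩
      rw [h0]
      refine ⟨?_, rfl⟩
      simp only [List.length_nil]
      omega
  · have hm : c ∉ p.2 := by simpa using hc
    rw [if_neg hc]
    simp [hm]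

-- the shape of A's second loop: sink flag, appended changed_coords, and one identical pass over hits per sinking ship
theorem foldl_sink {α : Type} (Q : α → Prop) [DecidablePred Q]
    (m : α → List (Int × Int)) (pass : List (Int × Int) → List (Int × Int)) (l : List α)
    (s : Bool × List (List (Int × Int)) × List (Int × Int)) :
    l.foldl (fun st a => if Q a then (true, st.2.1 ++ [m a], pass st.2.2) else st) s
    = (s.1 || !(l.filter (fun a => decide (Q a))).isEmpty,
       s.2.1 ++ (l.filter (fun a => decide (Q a))).map m,
       (l.filter (fun a => decide (Q a))).foldl (fun h _ => pass h) s.2.2) := by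
  induction l generalizing s with
  | nil => simp
  | cons a l ih =>
    simp only [List.foldl_cons, List.filter_cons]
    by_cases hq : Q a
    · rw [if_pos hq, ih]
      simp [hq]
    · rw [if_neg hq, ih]
      simp [hq]

-- one hits-cleaning pass over items = the same pass over the flattened target list
theorem pass_eq (origd : PySem.Dict String (List (Int × Int))) (items : List (String × List (Int × Int))) (h : List (Int × Int)) :
    items.foldl (fun h q =>
        if q.2.length = 0 then
          (origd.getD q.1 []).foldl (fun h hit => if h.contains hit then rmCoord h hit else h) h
        else h) h
    = ((items.filter (fun q => q.2.isEmpty)).flatMap (fun q => origd.getD q.1 [])).foldl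
        (fun h t => if h.contains t then rmCoord h t else h) h := by
  rw [List.foldl_flatMap, List.foldl_filter]
  apply PySem.List.foldl_congr_mem
  intro acc q _
  by_cases he : q.2.isEmpty
  · rw [if_pos he, if_pos (by simpa [List.isEmpty_iff, List.length_eq_zero_iff] using he)]
  · rw [if_neg he, if_neg (by simpa [List.isEmpty_iff, List.length_eq_zero_iff] using he)]

-- the flat cleanup pass only ever shrinks hits …
theorem flatPass_subset (targets h : List (Int × Int)) {x : Int × Int}
    (hx : x ∈ targets.foldl (fun h t => if h.contains t then rmCoord h t else h) h) : x ∈ h := by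
  induction targets generalizing h with
  | nil => simpa using hx
  | cons t ts ih =>
    simp only [List.foldl_cons] at hx
    by_cases hc : h.contains t
    · have hm : t ∈ h := by simpa using hc
      have : rmCoord h t = h.erase t := by
        simp [rmCoord, PySem.List.remove?_eq_some_erase h t hm]
      rw [if_pos hc, this] at hx
      exact (List.erase_subset) (ih _ hx)
    · rw [if_neg hc] at hx
      exact ih _ hx

-- … and, on a duplicate-free hits, leaves no target behind
theorem flatPass_clears (targets : List (Int × Int)) {h : List (Int × Int)} (hnd : h.Nodup) :
    ∀ t ∈ targets, t ∉ targets.foldl (fun h t => if h.contains t then rmCoord h t else h) h := by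
  induction targets generalizing h with
  | nil => simp
  | cons a ts ih =>
    intro t ht
    simp only [List.foldl_cons]
    by_cases hc : h.contains a
    · have hm : a ∈ h := by simpa using hc
      have hrm : rmCoord h a = h.erase a := by
        simp [rmCoord, PySem.List.remove?_eq_some_erase h a hm]
      rw [if_pos hc, hrm]
      rcases List.mem_cons.mp ht with rfl | hts
      · intro hmem
        exact (hnd.not_mem_erase) (flatPass_subset ts (h.erase t) hmem)
      · exact ih (hnd.erase a) t hts
    · rw [if_neg hc]
      rcases List.mem_cons.mp ht with rfl | hts
      · intro hmem
        have hnm : t ∉ h := by simpa using hc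
        exact hnm (flatPass_subset ts h hmem)
      · exact ih hnd t hts

-- a pass over targets none of which are present is the identity
theorem flatPass_id (targets : List (Int × Int)) {h : List (Int × Int)}
    (hd : ∀ t ∈ targets, t ∉ h) :
    targets.foldl (fun h t => if h.contains t then rmCoord h t else h) h = h := by
  induction targets with
  | nil => rfl
  | cons a ts ih =>
    have hna : a ∉ h := hd a List.mem_cons_self
    simp only [List.foldl_cons]
    rw [if_neg (by simpa using hna)]
    exact ih (fun t ht => hd t (List.mem_cons_of_mem _ ht))

-- repeating an idempotent pass changes nothing
theorem foldl_const_of_fix {α : Type} (l : List α) (pass : List (Int × Int) → List (Int × Int))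
    {r : List (Int × Int)} (hfix : pass r = r) :
    l.foldl (fun h _ => pass h) r = r := by
  induction l with
  | nil => rfl
  | cons a l ih => simp only [List.foldl_cons, hfix]; exact ih

-- a ship is in A's "sank now" filter iff it consisted of exactly the hit coordinate
theorem sank_iff (c : Int × Int) (cs : List (Int × Int)) :
    (cs.contains c && (rmCoord cs c).isEmpty) = true ↔ cs = [c] := by
  constructor
  · intro hb
    rw [Bool.and_eq_true] at hb
    have hm : c ∈ cs := by simpa using hb.1
    have hrm : rmCoord cs c = cs.erase c := by
      simp [rmCoord, PySem.List.remove?_eq_some_erase cs c hm]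
    have he : cs.erase c = [] := by
      have h2 := hb.2
      rw [hrm] at h2
      simpa [List.isEmpty_iff] using h2
    have hlen : cs.length = 1 := by
      have hle := List.length_erase_of_mem hm
      have hpos := List.length_pos_of_mem hm
      rw [he] at hle
      simp at hle
      omega
    obtain ⟨x, hx⟩ := List.length_eq_one_iff.mp hlen
    subst hx
    have : c = x := by simpa using hm
    simp [this]
  · rintro rfl
    simp [rmCoord, PySem.List.remove?_eq_some_erase [c] c (by simp)]

-- A's per-item cleanup pass (len == 0 test) equals B's (emptiness test)
theorem passAB (origd : PySem.Dict String (List (Int × Int))) (items : List (String × List (Int × Int))) (h : List (Int × Int)) :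
    items.foldl (fun h q =>
        if q.2.length = 0 then
          (origd.getD q.1 []).foldl (fun h hit => if h.contains hit then rmCoord h hit else h) h
        else h) h
    = items.foldl (fun h q =>
        if q.2.isEmpty then
          (origd.getD q.1 []).foldl (fun h hit => if h.contains hit then rmCoord h hit else h) h
        else h) h := by
  apply PySem.List.foldl_congr_mem
  intro acc q _
  by_cases he : q.2.isEmpty
  · rw [if_pos he, if_pos (by simpa [List.isEmpty_iff, List.length_eq_zero_iff] using he)]
  · rw [if_neg he, if_neg (by simpa [List.isEmpty_iff, List.length_eq_zero_iff] using he)]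

-- A's once-per-sunk-ship repetition of the cleanup pass equals B's single guarded pass
-- (for two or more repetitions, hits is duplicate-free by Pre_ and the pass is idempotent)
theorem repeated_pass_eq (origd : PySem.Dict String (List (Int × Int)))
    (items : List (String × List (Int × Int))) (filt : List (String × List (Int × Int)))
    (hits : List (Int × Int)) (hdup : 2 ≤ filt.length → hits.Nodup) :
    filt.foldl (fun h _ =>
        items.foldl (fun h q =>
          if q.2.length = 0 then
            (origd.getD q.1 []).foldl (fun h hit => if h.contains hit then rmCoord h hit else h) h
          else h) h) hits
    = (if (filt.map (·.1)).isEmpty then hits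
       else items.foldl (fun h q =>
          if q.2.isEmpty then
            (origd.getD q.1 []).foldl (fun h hit => if h.contains hit then rmCoord h hit else h) h
          else h) hits) := by
  match filt with
  | [] => simp
  | [x] =>
    rw [if_neg (by simp)]
    simp only [List.foldl_cons, List.foldl_nil]
    exact passAB origd items hits
  | x :: y :: rest =>
    rw [if_neg (by simp)]
    have hndh : hits.Nodup := hdup (by simp only [List.length_cons]; omega)
    simp only [List.foldl_cons]
    have hone : ∀ h : List (Int × Int),
        items.foldl (fun h q =>
          if q.2.length = 0 then
            (origd.getD q.1 []).foldl (fun h hit => if h.contains hit then rmCoord h hit else h) h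
          else h) h
        = ((items.filter (fun q => q.2.isEmpty)).flatMap (fun q => origd.getD q.1 [])).foldl
            (fun h t => if h.contains t then rmCoord h t else h) h :=
      fun h => pass_eq origd items h
    rw [hone, hone, ← passAB origd items hits, hone]
    have hfix := flatPass_id ((items.filter (fun q => q.2.isEmpty)).flatMap (fun q => origd.getD q.1 []))
      (flatPass_clears _ hndh)
    rw [hfix]
    exact foldl_const_of_fix rest _ ((hone _).trans hfix)

-- ===== VERDICT (by name: the statements are the Claim_ definitions above) =====
theorem remove_ships_spec : Claim_equal_remove_ships := by
  intro old_ships coordinate original_ships hits _hdom hpre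
  obtain ⟨-, -, hdup⟩ := hpre
  unfold Spec_remove_ships remove_ships remove_ships_alt
  have hnd : (PySem.Dict.ofList (κ := String) (ν := List (Int × Int)) old_ships).keys.Nodup :=
    PySem.Dict.nodup_keys_ofList _
  dsimp only
  rw [foldl_pair_split]
  dsimp only
  rw [keys_loop1 coordinate _ hnd]
  set d0 := PySem.Dict.ofList (κ := String) (ν := List (Int × Int)) old_ships with hd0
  set origd := PySem.Dict.ofList (κ := String) (ν := List (Int × Int)) original_ships with horigd
  set d1 := d0.items.foldl (fun d p => if p.2.contains coordinate then d.insert p.1 (rmCoord p.2 coordinate) else d) d0 with hd1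
  set filt := d0.items.filter (fun p => p.2.contains coordinate && (rmCoord p.2 coordinate).isEmpty) with hfiltdef
  -- rewrite A's second loop over keys as a loop over items
  have hkeys : d0.keys = d0.items.map (·.1) := rfl
  rw [hkeys, List.foldl_map]
  -- replace the length test by the sink condition, then take the loop's shape
  rw [PySem.List.foldl_congr_mem _ _
    (fun (st : Bool × List (List (Int × Int)) × List (Int × Int)) p =>
      if p.2.contains coordinate = true ∧ rmCoord p.2 coordinate = [] then
        (true, st.2.1 ++ [origd.getD p.1 []],
         d1.items.foldl (fun h q =>
            if q.2.length = 0 then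
              (origd.getD q.1 []).foldl (fun h hit => if h.contains hit then rmCoord h hit else h) h
            else h) st.2.2)
      else st) _
    (fun acc p hp => if_congr (cond_iff coordinate d0 hnd hp) rfl rfl)]
  rw [foldl_sink (fun p : String × List (Int × Int) => p.2.contains coordinate = true ∧ rmCoord p.2 coordinate = [])
      (fun p => origd.getD p.1 [])
      (fun h => d1.items.foldl (fun h q =>
          if q.2.length = 0 then
            (origd.getD q.1 []).foldl (fun h hit => if h.contains hit then rmCoord h hit else h) h
          else h) h)
      d0.items (false, [], hits)]
  have hfilt : d0.items.filter (fun p => decide (p.2.contains coordinate = true ∧ rmCoord p.2 coordinate = [])) = filt := by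
    apply List.filter_congr
    intro p _
    cases hrm : rmCoord p.2 coordinate <;> simp [hrm]
  rw [hfilt]
  -- Pre_'s duplicate condition, transported to filt
  have hdup' : 2 ≤ filt.length → hits.Nodup := by
    intro h2
    apply hdup
    have hf : filt = d0.items.filter (fun p => decide (p.2 = [coordinate])) := by
      apply List.filter_congr
      intro p _
      rw [Bool.eq_iff_iff, sank_iff]
      simp
    rwa [← hf]
  rw [repeated_pass_eq origd d1.items filt hits hdup', endLoopA_eq_all]
  simp [List.map_map]
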